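-- pv_equiv track=rewrite | github.com/koreabeginner96/CordingTest | 2023_04_02/pro_0_babling.py | solution
-- ===== SOURCE A (Python) =====
-- from itertools import permutations
--
-- def solution(babbling):
--     cnt=0
--     word=[]
--     A=["aya", "ye", "woo", "ma"]
--     for i in range(1,len(A)+1):
--         for j in permutations(A,i):
--             word.append(''.join(j))
--     for o in babbling:
--         if o in word:
--             cnt+=1
--     return cnt
-- ===== SOURCE B (Python) =====
-- def _is_babbling(o, words):
--     if not o:
--         return False
--     i = 0
--     used = set()
--     while i < len(o):
--         for w in words:
--             if w not in used and o.startswith(w, i):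
--                 used.add(w)
--                 i += len(w)
--                 break
--         else:
--             return False
--     return True
--
-- def solution(babbling):
--     words = ("aya", "ye", "woo", "ma")
--     cnt = 0
--     for o in babbling:
--         if _is_babbling(o, words):
--             cnt += 1
--     return cnt
-- ===== Notes on version B (the rewrite author's own statement) =====
-- stated objective: alternative
-- what changed: B drops the permutation-built 64-string lookup table and instead greedily parses each babbling front-to-back (the four words have distinct first letters, so each step's match is unique), tracking which words were already used.
import Mathlib
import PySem

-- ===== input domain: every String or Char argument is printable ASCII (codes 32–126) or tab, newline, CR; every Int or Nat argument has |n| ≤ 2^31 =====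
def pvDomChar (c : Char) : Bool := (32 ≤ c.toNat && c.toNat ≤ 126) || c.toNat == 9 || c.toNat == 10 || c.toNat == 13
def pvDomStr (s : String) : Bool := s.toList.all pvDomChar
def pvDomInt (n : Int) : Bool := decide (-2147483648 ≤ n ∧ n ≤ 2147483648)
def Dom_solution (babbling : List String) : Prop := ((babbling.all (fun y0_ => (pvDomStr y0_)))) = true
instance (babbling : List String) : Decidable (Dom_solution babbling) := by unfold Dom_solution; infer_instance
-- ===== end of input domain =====

-- B replaces A's permutation-built lookup table of 64 word concatenations by a greedy
-- front-to-back parse of each babbling with a used-word record (objective: alternative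
-- algorithm — no table, one linear scan per string; not measured faster).

-- ===== PORT A =====
-- itertools.permutations(l, n), ported step for step (the elements of A's word list are
-- distinct, so removing the chosen element by value equals removing it by position).
def pvPerms : Nat → List String → List (List String)
  | 0, _ => [[]]
  | n+1, l => l.flatMap (fun x => (pvPerms n (l.filter (fun z => z ≠ x))).map (fun j => x :: j))

def solution (babbling : List String) : Int :=
  let A : List String := ["aya", "ye", "woo", "ma"]
  let word : List String :=
    (PySem.List.pyRange 1 ((A.length : Int) + 1) 1).foldl
      (fun w i => w ++ (pvPerms i.toNat A).map (fun j => String.join j)) []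
  babbling.foldl (fun cnt o => if o ∈ word then cnt + 1 else cnt) 0

-- ===== PORT B =====
-- Greedy parse with one availability flag per word; the four words start with distinct
-- letters, so the branch taken at each step is forced by the first remaining character.
-- The fuel 4 is the number of words: each successful step consumes one word, so a fifth
-- step could never match — exactly where B's Python while-loop returns False.
def pvParse : Nat → List Char → Bool → Bool → Bool → Bool → Bool
  | _, [], _, _, _, _ => true
  | 0, _ :: _, _, _, _, _ => false
  | f+1, c :: cs, a, y, w, m =>
    if c = 'a' then a && ['y','a'].isPrefixOf cs && pvParse f (cs.drop 2) false y w m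
    else if c = 'y' then y && ['e'].isPrefixOf cs && pvParse f (cs.drop 1) a false w m
    else if c = 'w' then w && ['o','o'].isPrefixOf cs && pvParse f (cs.drop 2) a y false m
    else if c = 'm' then m && ['a'].isPrefixOf cs && pvParse f (cs.drop 1) a y w false
    else false

def solution_alt (babbling : List String) : Int :=
  babbling.foldl
    (fun cnt o =>
      if o.toList ≠ [] ∧ pvParse 4 o.toList true true true true = true then cnt + 1 else cnt) 0

-- ===== PRECONDITION & SPEC =====
def Spec_solution (babbling : List String) (out : Int) : Prop := out = solution_alt babbling
instance (babbling : List String) (out : Int) : Decidable (Spec_solution babbling out) := by unfold Spec_solution; infer_instance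

-- ===== CLAIM (what is proved, stated in full; the proofs are below) =====
def Claim_equal_solution : Prop := ∀ (babbling : List String), Dom_solution babbling → Spec_solution babbling (solution babbling)

-- ===== LEMMAS AND PROOFS =====

-- A's word table, as the closed term `solution` computes (let-bindings zeta-reduced).
def pvWordA : List String :=
  (PySem.List.pyRange 1 ((["aya", "ye", "woo", "ma"].length : Int) + 1) 1).foldl
    (fun w i => w ++ (pvPerms i.toNat ["aya", "ye", "woo", "ma"]).map (fun j => String.join j)) []

-- The language pvParse accepts with given fuel/availability, as a concrete list.
def pvLang : Nat → Bool → Bool → Bool → Bool → List (List Char)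
  | 0, _, _, _, _ => [[]]
  | f+1, a, y, w, m =>
    [] ::
      ((if a then (pvLang f false y w m).map (fun t => ['a','y','a'] ++ t) else []) ++
       (if y then (pvLang f a false w m).map (fun t => ['y','e'] ++ t) else []) ++
       (if w then (pvLang f a y false m).map (fun t => ['w','o','o'] ++ t) else []) ++
       (if m then (pvLang f a y w false).map (fun t => ['m','a'] ++ t) else []))

-- The nonempty members of that language.
def pvLNE : List (List Char) := (pvLang 4 true true true true).filter (fun l => !l.isEmpty)

theorem pv_pdm (p cs : List Char) (L : List (List Char)) :
    (p.isPrefixOf cs = true ∧ cs.drop p.length ∈ L) ↔ ∃ t ∈ L, cs = p ++ t := by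
  rw [List.isPrefixOf_iff_prefix]
  constructor
  · rintro ⟨⟨t, rfl⟩, hm⟩
    exact ⟨t, by simpa using hm, rfl⟩
  · rintro ⟨t, ht, rfl⟩
    exact ⟨⟨t, rfl⟩, by simpa using ht⟩

theorem pv_mem_branch {b : Bool} {L : List (List Char)} {p x : List Char}
    (h : x ∈ (if b then L.map (fun t => p ++ t) else [])) :
    b = true ∧ ∃ t ∈ L, x = p ++ t := by
  split at h
  · next hb => exact ⟨hb, by simpa [List.mem_map, eq_comm] using h⟩
  · simp at h

theorem pv_mem_branch' {b : Bool} {L : List (List Char)} {p t : List Char}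
    (hb : b = true) (ht : t ∈ L) :
    p ++ t ∈ (if b then L.map (fun t => p ++ t) else []) := by
  subst hb
  exact List.mem_map_of_mem ht

theorem pvParse_iff_mem_lang (f : Nat) (cs : List Char) (a y w m : Bool) :
    pvParse f cs a y w m = true ↔ cs ∈ pvLang f a y w m := by
  induction f generalizing cs a y w m with
  | zero =>
      cases cs with
      | nil => simp [pvParse, pvLang]
      | cons c cs => simp [pvParse, pvLang]
  | succ f ih =>
      cases cs with
      | nil => simp [pvParse, pvLang]
      | cons c cs =>
        constructor
        · intro h
          simp only [pvParse] at h
          split_ifs at h with h1 h2 h3 h4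
          all_goals first
          | (subst h1
             obtain ⟨⟨ha, hp⟩, hq⟩ := by simpa only [Bool.and_eq_true] using h
             rw [ih] at hq
             obtain ⟨t, htL, rfl⟩ := (pv_pdm _ cs _).mp ⟨hp, hq⟩
             exact List.mem_cons_of_mem _ (List.mem_append_left _ (List.mem_append_left _
               (List.mem_append_left _ (pv_mem_branch' ha htL))))
             )
          | skip
          · -- c = 'y'
            subst h2
            obtain ⟨⟨hy, hp⟩, hq⟩ := by simpa only [Bool.and_eq_true] using h
            rw [ih] at hq
            obtain ⟨t, htL, rfl⟩ := (pv_pdm _ cs _).mp ⟨hp, hq⟩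
            exact List.mem_cons_of_mem _ (List.mem_append_left _ (List.mem_append_left _
              (List.mem_append_right _ (pv_mem_branch' hy htL))))
          · subst h3
            obtain ⟨⟨hw, hp⟩, hq⟩ := by simpa only [Bool.and_eq_true] using h
            rw [ih] at hq
            obtain ⟨t, htL, rfl⟩ := (pv_pdm _ cs _).mp ⟨hp, hq⟩
            exact List.mem_cons_of_mem _ (List.mem_append_left _
              (List.mem_append_right _ (pv_mem_branch' hw htL)))
          · subst h4
            obtain ⟨⟨hm, hp⟩, hq⟩ := by simpa only [Bool.and_eq_true] using h
            rw [ih] at hq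
            obtain ⟨t, htL, rfl⟩ := (pv_pdm _ cs _).mp ⟨hp, hq⟩
            exact List.mem_cons_of_mem _ (List.mem_append_right _ (pv_mem_branch' hm htL))
        · intro h
          simp only [pvLang, List.mem_cons, List.mem_append] at h
          rcases h with h0 | (((hA | hY) | hW) | hM)
          · simp at h0
          · obtain ⟨ha, t, htL, heq⟩ := pv_mem_branch hA
            obtain ⟨rfl, rfl⟩ : c = 'a' ∧ cs = ['y','a'] ++ t := by
              simpa using heq
            obtain ⟨hp, hmem⟩ := (pv_pdm ['y','a'] (['y','a'] ++ t) (pvLang f false y w m)).mpr ⟨t, htL, rfl⟩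
            simp [pvParse, ha, ih, htL]
          · obtain ⟨hy, t, htL, heq⟩ := pv_mem_branch hY
            obtain ⟨rfl, rfl⟩ : c = 'y' ∧ cs = ['e'] ++ t := by simpa using heq
            obtain ⟨hp, hmem⟩ := (pv_pdm ['e'] (['e'] ++ t) (pvLang f a false w m)).mpr ⟨t, htL, rfl⟩
            simp [pvParse, hy, ih, htL]
          · obtain ⟨hw, t, htL, heq⟩ := pv_mem_branch hW
            obtain ⟨rfl, rfl⟩ : c = 'w' ∧ cs = ['o','o'] ++ t := by simpa using heq
            obtain ⟨hp, hmem⟩ := (pv_pdm ['o','o'] (['o','o'] ++ t) (pvLang f a y false m)).mpr ⟨t, htL, rfl⟩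
            simp [pvParse, hw, ih, htL]
          · obtain ⟨hm, t, htL, heq⟩ := pv_mem_branch hM
            obtain ⟨rfl, rfl⟩ : c = 'm' ∧ cs = ['a'] ++ t := by simpa using heq
            obtain ⟨hp, hmem⟩ := (pv_pdm ['a'] (['a'] ++ t) (pvLang f a y w false)).mpr ⟨t, htL, rfl⟩
            simp [pvParse, hm, ih, htL]

theorem pv_word_sub : (pvWordA.map String.toList).all (fun l => l ∈ pvLNE) = true := by decide

theorem pv_lne_sub : pvLNE.all (fun l => l ∈ pvWordA.map String.toList) = true := by decide

theorem pv_mem_word_iff (o : String) : o ∈ pvWordA ↔ o.toList ∈ pvLNE := by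
  constructor
  · intro h
    exact of_decide_eq_true (List.all_eq_true.mp pv_word_sub _ (List.mem_map_of_mem h))
  · intro h
    obtain ⟨s, hs, heq⟩ := List.mem_map.mp (of_decide_eq_true (List.all_eq_true.mp pv_lne_sub _ h))
    have : s = o := by
      have := congrArg String.ofList heq
      simpa using this
    exact this ▸ hs

theorem pv_check_iff (o : String) :
    o ∈ pvWordA ↔ (o.toList ≠ [] ∧ pvParse 4 o.toList true true true true = true) := by
  rw [pv_mem_word_iff, pvParse_iff_mem_lang]
  simp only [pvLNE, List.mem_filter, Bool.not_eq_eq_eq_not, Bool.not_true,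
    List.isEmpty_eq_false_iff]
  constructor
  · rintro ⟨h1, h2⟩
    exact ⟨by simpa using h2, h1⟩
  · rintro ⟨h1, h2⟩
    exact ⟨h2, by simpa using h1⟩

theorem pv_foldl_eq (l : List String) (k : Int) :
    l.foldl (fun cnt o => if o ∈ pvWordA then cnt + 1 else cnt) k
      = l.foldl
          (fun cnt o =>
            if o.toList ≠ [] ∧ pvParse 4 o.toList true true true true = true then cnt + 1
            else cnt) k := by
  induction l generalizing k with
  | nil => rfl
  | cons o l ih =>
      simp only [List.foldl_cons]
      rw [if_congr (pv_check_iff o) rfl rfl, ih]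

-- ===== VERDICT (by name: the statement is the Claim_ definition above) =====
theorem solution_spec : Claim_equal_solution := by
  intro babbling _
  show solution babbling = solution_alt babbling
  exact pv_foldl_eq babbling 0
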